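-- pv_equiv track=rewrite | github.com/JJEW22/JJEW22.github.io | static/marchMadness/computeStarBonuses.py | detect_current_round
-- ===== SOURCE A (Python) =====
-- from typing import Dict, List, Optional, Any, Tuple
--
-- def detect_current_round(results_bracket: dict) -> Tuple[int, bool, Dict[int, Tuple[int, int]]]:
--     """
--     Detect the current round from the results bracket.
--
--     Returns:
--         Tuple of (completed_round, is_halfway, round_status)
--         - completed_round: The highest round where ALL games have winners (0 if none complete)
--         - is_halfway: True if any future round has at least 1 game decided
--         - round_status: Dict of round_num -> (decided_games, total_games)
--     """
--     last_complete_round = 0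
--     next_round_partial = False
--     round_status = {}
--
--     for round_num in range(1, 7):
--         round_key = f"round{round_num}"
--         games = results_bracket.get(round_key, [])
--
--         if not games:
--             round_status[round_num] = (0, 0)
--             continue
--
--         total_games = len(games)
--         decided_games = sum(1 for g in games if g and g.get('winner'))
--         round_status[round_num] = (decided_games, total_games)
--
--         if decided_games == total_games:
--             last_complete_round = round_num
--         elif decided_games > 0:
--             next_round_partial = True
--
--     return last_complete_round, next_round_partial, round_status
-- ===== SOURCE B (Python) =====
-- ROUND_NUMS = {f"round{n}": n for n in range(1, 7)}
--
--
-- def detect_current_round(results_bracket: dict):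
--     # Pass 1: index the input by parsed round number in one scan over its items.
--     counts = {}
--     for key, games in results_bracket.items():
--         n = ROUND_NUMS.get(key)
--         if n is not None:
--             counts.setdefault(n, (0, 0) if not games else (
--                 sum(1 for g in games if g and g.get('winner')), len(games)))
--     # Pass 2: assemble the table, then derive the two scalars by reductions over it.
--     round_status = {n: counts.get(n, (0, 0)) for n in range(1, 7)}
--     last_complete_round = max(
--         (n for n, (d, t) in round_status.items() if t and d == t), default=0)
--     next_round_partial = any(0 < d < t for d, t in round_status.values())
--     return last_complete_round, next_round_partial, round_status
-- ===== Notes on version B (the rewrite author's own statement) =====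
-- stated objective: alternative
-- what changed: A loops over rounds 1..6, doing a dict lookup per round and threading three mutable accumulators through one stateful loop; B inverts the traversal: it scans the input's items once, parsing each key through a precomputed round-name index to build a counts table keyed by round number (so the per-round dict lookup disappears), then assembles round_status from that table and derives last_complete_round and next_round_partial as two separate reductions (max with default / any) over the table.
import Mathlib
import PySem

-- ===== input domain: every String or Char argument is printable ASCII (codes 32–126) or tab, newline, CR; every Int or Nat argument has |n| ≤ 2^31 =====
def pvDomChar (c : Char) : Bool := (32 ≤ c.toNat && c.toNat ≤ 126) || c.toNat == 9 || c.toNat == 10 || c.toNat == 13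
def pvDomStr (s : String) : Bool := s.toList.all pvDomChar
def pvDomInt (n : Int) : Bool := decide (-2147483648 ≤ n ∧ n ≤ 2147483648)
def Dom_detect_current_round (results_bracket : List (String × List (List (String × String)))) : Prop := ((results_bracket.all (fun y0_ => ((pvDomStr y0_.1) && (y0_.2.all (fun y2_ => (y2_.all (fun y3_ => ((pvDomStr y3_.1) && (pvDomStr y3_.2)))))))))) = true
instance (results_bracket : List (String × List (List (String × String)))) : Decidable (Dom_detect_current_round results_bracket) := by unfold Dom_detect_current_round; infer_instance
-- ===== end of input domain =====

-- B inverts A's traversal: one scan over the input's items building a counts index keyed by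
-- parsed round number, then the table and the two scalars are derived from that index (same cost).

-- ===== PORT A =====
-- results_bracket.get(key, []) — dict lookup is first match in the association list
def pvGetGames (results_bracket : List (String × List (List (String × String)))) (key : String) : List (List (String × String)) :=
  ((results_bracket.find? (fun p => p.1 == key)).map Prod.snd).getD []

-- truthiness of `g and g.get('winner')`: g a non-empty dict and 'winner' mapped to a non-empty string
def pvDecided (g : List (String × String)) : Bool :=
  !g.isEmpty &&
    (match g.find? (fun p => p.1 == "winner") with
     | some p => !(p.2 == "")
     | none => false)

-- the body of A's `for round_num in range(1, 7)` loop, on state (last_complete_round, next_round_partial, round_status)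
def pvStepA (st : Int × Bool × List (Int × Int × Int)) (p : Int × List (List (String × String))) :
    Int × Bool × List (Int × Int × Int) :=
  if p.2.isEmpty then (st.1, st.2.1, st.2.2 ++ [(p.1, 0, 0)])
  else
    let total : Int := (p.2.length : Int)
    let decided : Int := p.2.foldl (fun acc g => if pvDecided g then acc + 1 else acc) 0
    if decided == total then (p.1, st.2.1, st.2.2 ++ [(p.1, decided, total)])
    else if decided > 0 then (st.1, true, st.2.2 ++ [(p.1, decided, total)])
    else (st.1, st.2.1, st.2.2 ++ [(p.1, decided, total)])

def detect_current_round (results_bracket : List (String × List (List (String × String)))) : Int × Bool × (List (Int × Int × Int)) :=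
  (PySem.List.pyRange 1 7).foldl
    (fun st round_num =>
      pvStepA st (round_num, pvGetGames results_bracket ("round" ++ PySem.Int.toStr round_num)))
    (0, false, [])

-- ===== PORT B =====
-- module constant ROUND_NUMS = {f"round{n}": n for n in range(1, 7)}
def pvRoundNums : PySem.Dict String Int :=
  (PySem.List.pyRange 1 7).foldl (fun d n => d.insert ("round" ++ PySem.Int.toStr n) n) PySem.Dict.empty

-- `(0, 0) if not games else (sum(1 for g in games if g and g.get('winner')), len(games))`
def pvRoundCounts (games : List (List (String × String))) : Int × Int :=
  if games.isEmpty then (0, 0)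
  else ((games.countP pvDecided : Int), (games.length : Int))

-- B's pass 1: `counts.setdefault(n, …)` for each item whose key parses via ROUND_NUMS
def pvIndexStep (counts : PySem.Dict Int (Int × Int)) (p : String × List (List (String × String))) :
    PySem.Dict Int (Int × Int) :=
  match PySem.Dict.get? pvRoundNums p.1 with
  | some n => counts.setdefault n (pvRoundCounts p.2)
  | none => counts

def detect_current_round_alt (results_bracket : List (String × List (List (String × String)))) : Int × Bool × (List (Int × Int × Int)) :=
  let counts : PySem.Dict Int (Int × Int) := results_bracket.foldl pvIndexStep PySem.Dict.empty
  let round_status : List (Int × Int × Int) :=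
    (PySem.List.pyRange 1 7).map (fun n => (n, counts.getD n (0, 0)))
  let last_complete_round : Int :=
    PySem.List.maxD
      ((round_status.filter (fun q => !(q.2.2 == 0) && (q.2.1 == q.2.2))).map Prod.fst)
      (fun x => x) 0
  let next_round_partial : Bool :=
    round_status.any (fun q => decide (0 < q.2.1) && decide (q.2.1 < q.2.2))
  (last_complete_round, next_round_partial, round_status)

-- ===== PRECONDITION & SPEC =====
def Spec_detect_current_round (results_bracket : List (String × List (List (String × String)))) (out : Int × Bool × (List (Int × Int × Int))) : Prop := out = detect_current_round_alt results_bracket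
instance (results_bracket : List (String × List (List (String × String)))) (out : Int × Bool × (List (Int × Int × Int))) : Decidable (Spec_detect_current_round results_bracket out) := by unfold Spec_detect_current_round; infer_instance

-- ===== CLAIM (what is proved, stated in full; the proofs are below) =====
def Claim_equal_detect_current_round : Prop := ∀ (results_bracket : List (String × List (List (String × String)))), Dom_detect_current_round results_bracket → Spec_detect_current_round results_bracket (detect_current_round results_bracket)

-- ===== LEMMAS AND PROOFS =====

-- the (round, decided, total) entry A records for a round with games `p.2`
def pvEntry (p : Int × List (List (String × String))) : Int × Int × Int :=
  (p.1, ((p.2.countP pvDecided : Int), (p.2.length : Int)))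

lemma pvRoundCounts_eq (gs : List (List (String × String))) :
    pvRoundCounts gs = ((gs.countP pvDecided : Int), (gs.length : Int)) := by
  cases gs <;> simp [pvRoundCounts]

lemma pvStepA_entry (st : Int × Bool × List (Int × Int × Int)) (p : Int × List (List (String × String))) :
    pvStepA st p =
      ((if !((pvEntry p).2.2 == 0) && ((pvEntry p).2.1 == (pvEntry p).2.2) then p.1 else st.1),
       st.2.1 || (decide (0 < (pvEntry p).2.1) && decide ((pvEntry p).2.1 < (pvEntry p).2.2)),
       st.2.2 ++ [pvEntry p]) := by
  rcases p with ⟨n, gs⟩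
  rcases gs with _ | ⟨g, gs'⟩
  · simp [pvStepA, pvEntry]
  · have hcount := PySem.List.foldl_if_add_one pvDecided (g :: gs') 0
    have hle : (g :: gs').countP pvDecided ≤ (g :: gs').length := List.countP_le_length
    simp only [pvStepA, pvEntry, List.isEmpty_cons, hcount]
    split_ifs with h1 h2
    all_goals simp_all
    all_goals omega

lemma pvFoldA (M : List (Int × List (List (String × String))))
    (last : Int) (part : Bool) (status : List (Int × Int × Int))
    (hmono : (M.map Prod.fst).Pairwise (· < ·))
    (hge : ∀ p ∈ M, last ≤ p.1) :
    M.foldl pvStepA (last, part, status) =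
      ((((M.map pvEntry).filter (fun q => !(q.2.2 == 0) && (q.2.1 == q.2.2))).map Prod.fst).foldl max last,
       part || (M.map pvEntry).any (fun q => decide (0 < q.2.1) && decide (q.2.1 < q.2.2)),
       status ++ M.map pvEntry) := by
  induction M generalizing last part status with
  | nil => simp
  | cons p M ih =>
    have hmono' : (M.map Prod.fst).Pairwise (· < ·) := (List.pairwise_cons.mp hmono).2
    have hhead : ∀ q ∈ M, p.1 < q.1 := by
      intro q hq
      exact (List.pairwise_cons.mp hmono).1 q.1 (List.mem_map_of_mem hq)
    have hlast : last ≤ p.1 := hge p List.mem_cons_self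
    rw [List.foldl_cons, pvStepA_entry]
    cases hcb : (!((pvEntry p).2.2 == 0) && ((pvEntry p).2.1 == (pvEntry p).2.2)) with
    | true =>
      simp only [reduceIte]
      rw [ih _ _ _ hmono' (fun q hq => le_of_lt (hhead q hq))]
      have h1 : max last (pvEntry p).1 = p.1 := max_eq_right hlast
      simp [hcb, Bool.or_assoc, List.append_assoc, h1]
    | false =>
      rw [if_neg (by decide : ¬(false = true))]
      rw [ih _ _ _ hmono' (fun q hq => le_trans hlast (le_of_lt (hhead q hq)))]
      simp [hcb, Bool.or_assoc, List.append_assoc]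

lemma pvFoldMax_eq_maxD (l : List Int) (h : ∀ x ∈ l, 0 ≤ x) :
    l.foldl max 0 = PySem.List.maxD l (fun x => x) 0 := by
  cases l with
  | nil => rfl
  | cons x t =>
    simp only [PySem.List.maxD, PySem.List.max?_id_cons, Option.getD_some, List.foldl_cons]
    rw [max_eq_right (h x List.mem_cons_self)]

-- pvRoundNums unfolded to a literal dict
lemma pvRoundNums_eq : pvRoundNums = PySem.Dict.mk
    [("round1", 1), ("round2", 2), ("round3", 3), ("round4", 4), ("round5", 5), ("round6", 6)] := by
  decide

-- a key parses to n (1 ≤ n < 7) iff it is the exact string "round<n>"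
lemma pvHmatch (n : Int) (hn1 : 1 ≤ n) (hn2 : n < 7) (key : String) :
    (PySem.Dict.get? pvRoundNums key == some n) = (key == "round" ++ PySem.Int.toStr n) := by
  rw [pvRoundNums_eq]
  interval_cases n <;>
  · simp only [PySem.Dict.get?_mk_cons]
    split_ifs <;> simp_all only [beq_iff_eq] <;>
      first
        | (rename_i h; subst h; decide)
        | (rename_i h1 h2 h3 h4 h5 h6
           show false = _
           symm
           rw [beq_eq_false_iff_ne]
           first
             | exact fun h => h1 h.symm
             | exact fun h => h2 h.symm
             | exact fun h => h3 h.symm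
             | exact fun h => h4 h.symm
             | exact fun h => h5 h.symm
             | exact fun h => h6 h.symm)

-- B's index lookup at round n equals pvRoundCounts of A's first-match dict lookup
lemma pvBuild_get (rb : List (String × List (List (String × String)))) (n : Int) (s : String)
    (hmatch : ∀ key, (PySem.Dict.get? pvRoundNums key == some n) = (key == s))
    (d : PySem.Dict Int (Int × Int)) :
    PySem.Dict.get? (rb.foldl pvIndexStep d) n =
      (PySem.Dict.get? d n).orElse
        (fun _ => (rb.find? (fun p => p.1 == s)).map (fun p => pvRoundCounts p.2)) := by
  induction rb generalizing d with
  | nil =>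
    rw [List.foldl_nil]
    cases hd : PySem.Dict.get? d n <;> simp [Option.orElse]
  | cons p rb ih =>
    rw [List.foldl_cons]
    have hm := hmatch p.1
    cases hg : PySem.Dict.get? pvRoundNums p.1 with
    | none =>
      have hps : (p.1 == s) = false := by rw [← hm, hg]; rfl
      simp only [pvIndexStep, hg]
      rw [ih d, List.find?_cons_of_neg (by simp [hps])]
    | some m =>
      by_cases hmn : m = n
      · subst hmn
        have hps : (p.1 == s) = true := by rw [← hm, hg]; simp
        simp only [pvIndexStep, hg]
        rw [ih _, List.find?_cons_of_pos (by simp [hps]), PySem.Dict.get?_setdefault_self]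
        cases hd : PySem.Dict.get? d m <;> rfl
      · have hps : (p.1 == s) = false := by
          rw [← hm, hg]; simp [hmn]
        simp only [pvIndexStep, hg]
        rw [ih _, List.find?_cons_of_neg (by simp [hps])]
        congr 1
        cases hc : PySem.Dict.contains d m with
        | true => rw [PySem.Dict.setdefault_of_contains _ _ hc]
        | false =>
          rw [PySem.Dict.setdefault_of_not_contains _ _ hc,
            PySem.Dict.get?_insert_of_ne _ _ (Ne.symm hmn)]

lemma pvBuild_getD (rb : List (String × List (List (String × String)))) (n : Int) (s : String)
    (hmatch : ∀ key, (PySem.Dict.get? pvRoundNums key == some n) = (key == s)) :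
    PySem.Dict.getD (rb.foldl pvIndexStep PySem.Dict.empty) n (0, 0) =
      pvRoundCounts (pvGetGames rb s) := by
  rw [PySem.Dict.getD_eq_get?_getD, pvBuild_get rb n s hmatch]
  cases hf : rb.find? (fun p => p.1 == s) <;>
    simp [pvGetGames, hf, PySem.Dict.get?_empty, pvRoundCounts, Option.orElse]

-- ===== VERDICT (by name: the statement is the Claim_ definition above) =====
theorem detect_current_round_spec : Claim_equal_detect_current_round := by
  intro rb _
  show detect_current_round rb = detect_current_round_alt rb
  have hA : detect_current_round rb =
      ((PySem.List.pyRange 1 7).map (fun n => (n, pvGetGames rb ("round" ++ PySem.Int.toStr n)))).foldl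
        pvStepA (0, false, []) := by
    rw [List.foldl_map]
    rfl
  have hmono : (((PySem.List.pyRange 1 7).map (fun n => (n, pvGetGames rb ("round" ++ PySem.Int.toStr n)))).map Prod.fst).Pairwise (· < ·) := by
    rw [List.map_map]
    exact PySem.List.pairwise_lt_pyRange_one 1 7
  have hge : ∀ p ∈ (PySem.List.pyRange 1 7).map (fun n => (n, pvGetGames rb ("round" ++ PySem.Int.toStr n))), (0:Int) ≤ p.1 := by
    intro p hp
    rcases List.mem_map.mp hp with ⟨n, hn, rfl⟩
    have := (PySem.List.mem_pyRange_one.mp hn).1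
    omega
  rw [hA, pvFoldA _ 0 false [] hmono hge, List.map_map]
  have hentry : (PySem.List.pyRange 1 7).map (pvEntry ∘ fun n => (n, pvGetGames rb ("round" ++ PySem.Int.toStr n)))
      = (PySem.List.pyRange 1 7).map (fun n => (n, PySem.Dict.getD (rb.foldl pvIndexStep PySem.Dict.empty) n (0, 0))) := by
    refine List.map_congr_left ?_
    intro n hn
    obtain ⟨hn1, hn2⟩ := PySem.List.mem_pyRange_one.mp hn
    rw [pvBuild_getD rb n _ (pvHmatch n hn1 hn2)]
    simp [pvEntry, pvRoundCounts_eq]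
  rw [hentry]
  show (_, _, _) = ((PySem.List.maxD _ (fun x => x) 0 : Int), _, _)
  refine Prod.ext ?_ (Prod.ext (Bool.false_or _) (List.nil_append _))
  apply pvFoldMax_eq_maxD
  intro x hx
  rcases List.mem_map.mp hx with ⟨q, hq, rfl⟩
  rcases List.mem_filter.mp hq with ⟨hq', _⟩
  rcases List.mem_map.mp hq' with ⟨n, hn, rfl⟩
  have := (PySem.List.mem_pyRange_one.mp hn).1
  omega
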